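-- pv_equiv track=rewrite | github.com/Jamesprocode/ISMIR-Jazzmus | jazzmus/dataset/encoding_convertions.py | _get_character_lvl
-- ===== SOURCE A (Python) =====
-- def _get_character_lvl(lines):
--     # split each character into a token
--     tokens = []
--     for l in lines:
--         for c in l:
--             tokens.append(c)
--
--     # if there are < t > or < n > tokens, they should be a single token
--     # e.g. < t > should be <t>
--     for i, t in enumerate(tokens):
--         if t == "<" and tokens[i+1] == "t" and tokens[i+2] == ">":
--             tokens[i] = "<t>"
--             tokens.pop(i+1)
--             tokens.pop(i+1)
--         if t == "<" and tokens[i+1] == "n" and tokens[i+2] == ">":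
--             tokens[i] = "<n>"
--             tokens.pop(i+1)
--             tokens.pop(i+1)
--     return tokens
-- ===== SOURCE B (Python) =====
-- def _get_character_lvl(lines):
--     # single forward pass over the joined text; no list mutation
--     s = "".join(lines)
--     tokens = []
--     i = 0
--     n = len(s)
--     while i < n:
--         if s[i] == "<" and s[i + 1:i + 3] in ("t>", "n>"):
--             tokens.append(s[i:i + 3])
--             i += 3
--         else:
--             tokens.append(s[i])
--             i += 1
--     return tokens
-- ===== Notes on version B (the rewrite author's own statement) =====
-- stated objective: simpler
-- what changed: B replaces A's index-enumerate loop with in-place pops over a mutable token list by one forward pass over the joined string that emits '<t>'/'<n>' or single characters, never mutating or re-indexing a list.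
-- intended difference: On inputs whose joined text contains '<t>n>', A's stale loop variable t makes the second if overwrite the just-merged '<t>' token with '<n>' and also swallow the following 'n>' tokens, while B keeps the intended '<t>', 'n', '>' tokens; merging '<t>' and '<n>' independently is clearly what the code means. — e.g. on _get_character_lvl(["<t>n>a"]): A returns ["<n>", "a"], B returns ["<t>", "n", ">", "a"]
import Mathlib
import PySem

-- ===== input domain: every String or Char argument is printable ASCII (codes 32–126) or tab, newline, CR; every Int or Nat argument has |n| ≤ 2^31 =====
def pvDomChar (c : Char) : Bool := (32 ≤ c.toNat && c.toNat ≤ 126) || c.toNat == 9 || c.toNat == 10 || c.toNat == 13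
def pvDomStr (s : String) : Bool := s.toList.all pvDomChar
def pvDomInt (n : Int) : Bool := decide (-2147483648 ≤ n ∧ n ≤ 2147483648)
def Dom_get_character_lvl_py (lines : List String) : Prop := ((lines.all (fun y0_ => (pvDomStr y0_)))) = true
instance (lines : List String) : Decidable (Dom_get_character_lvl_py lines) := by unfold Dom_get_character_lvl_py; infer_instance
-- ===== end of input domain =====

-- B replaces A's enumerate/pop merge loop by a single forward pass over the joined characters
-- (simpler: no list mutation or re-indexing); A mutates only its local list, not the argument.

-- ===== PORT A =====

-- a one-character token, as Python's iteration over a string yields 1-char strings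
def pvSingle (c : Char) : String := String.ofList [c]

-- the two nested for-loops building `tokens`
def pvTokens (lines : List String) : List String :=
  lines.foldl (fun tokens l => l.toList.foldl (fun tokens c => tokens ++ [pvSingle c]) tokens) []

-- tokens[i] = tag; tokens.pop(i+1); tokens.pop(i+1)  — expressed with take/drop
def pvMergeAt (tokens : List String) (i : Nat) (tag : String) : List String :=
  tokens.take i ++ [tag] ++ tokens.drop (i + 3)

-- the body of one iteration of A's for-loop; note t is read once (Python's stale loop variable)
-- and the second if re-reads the mutated list.  tokens[i+k]? = none models Python's IndexError
-- (exactly those inputs are excluded by Pre_).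
def pvStep (tokens : List String) (i : Nat) : List String :=
  let t := (tokens[i]?).getD ""      -- in range whenever the loop guard holds
  let tokens1 :=
    if t = "<" ∧ tokens[i+1]? = some "t" ∧ tokens[i+2]? = some ">" then
      pvMergeAt tokens i "<t>" else tokens
  if t = "<" ∧ tokens1[i+1]? = some "n" ∧ tokens1[i+2]? = some ">" then
    pvMergeAt tokens1 i "<n>" else tokens1

-- `for i, t in enumerate(tokens)` over the shrinking list; fuel = the initial length bounds the
-- number of iterations (i grows by 1 each step and the list never grows), so the fuel guard
-- never changes the result.
def pvLoopA : Nat → List String → Nat → List String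
  | 0, tokens, _ => tokens
  | fuel + 1, tokens, i =>
    if i < tokens.length then pvLoopA fuel (pvStep tokens i) (i + 1) else tokens

def get_character_lvl_py (lines : List String) : List String :=
  pvLoopA (pvTokens lines).length (pvTokens lines) 0

-- ===== PORT B =====

-- s = "".join(lines)
def pvConcat (lines : List String) : List Char := lines.flatMap String.toList

-- B's single forward pass: merge "<t>"/"<n>" where they occur, else emit one character
def pvScanB : List Char → List String
  | '<' :: 't' :: '>' :: rest => "<t>" :: pvScanB rest
  | '<' :: 'n' :: '>' :: rest => "<n>" :: pvScanB rest
  | c :: rest => pvSingle c :: pvScanB rest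
  | [] => []

def get_character_lvl_py_alt (lines : List String) : List String :=
  pvScanB (pvConcat lines)

-- ===== PRECONDITION & SPEC =====

-- the joined text, as Pre_/D_/Raises_ see it (independent of the ports)
def pvJoined (lines : List String) : List Char := (String.join lines).toList

-- Pre_ excludes exactly the inputs on which A raises IndexError: the joined text ends in one of
-- five patterns on which the lookahead tokens[i+1]/tokens[i+2] runs off the end of the list
def Pre_get_character_lvl_py (lines : List String) : Prop :=
  ¬ (['<'] <:+ pvJoined lines ∨ ['<','t'] <:+ pvJoined lines ∨ ['<','n'] <:+ pvJoined lines ∨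
     ['<','t','>'] <:+ pvJoined lines ∨ ['<','t','>','n'] <:+ pvJoined lines)

instance (lines : List String) : Decidable (Pre_get_character_lvl_py lines) := by
  unfold Pre_get_character_lvl_py; infer_instance

def pvWitness_get_character_lvl_py : List String := ["a<t> <n>b"]

-- On inputs whose joined text contains "<t>n>", A's stale loop variable t lets the second if
-- overwrite the freshly merged "<t>" token with "<n>" and swallow the following "n>"; B returns
-- the intended tokens "<t>","n",">" — merging "<t>" and "<n>" independently is what the code means.
def D_get_character_lvl_py (lines : List String) : Prop :=
  ['<','t','>','n','>'] <:+: pvJoined lines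

instance (lines : List String) : Decidable (D_get_character_lvl_py lines) := by
  unfold D_get_character_lvl_py; infer_instance

def Spec_get_character_lvl_py (lines : List String) (out : List String) : Prop :=
  ¬ D_get_character_lvl_py lines → out = get_character_lvl_py_alt lines

instance (lines : List String) (out : List String) : Decidable (Spec_get_character_lvl_py lines out) := by
  unfold Spec_get_character_lvl_py; infer_instance

def pvDiffWitness_get_character_lvl_py : List String := ["<t>n>a"]

def pvDiffWitnessOut_get_character_lvl_py : (List String) × (List String) :=
  (["<n>", "a"], ["<t>", "n", ">", "a"])

-- ===== CLAIM =====

def Claim_unchanged_get_character_lvl_py : Prop :=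
  ∀ (lines : List String), Dom_get_character_lvl_py lines → Pre_get_character_lvl_py lines →
    Spec_get_character_lvl_py lines (get_character_lvl_py lines)

def Claim_changed_get_character_lvl_py : Prop :=
  Dom_get_character_lvl_py (pvDiffWitness_get_character_lvl_py) ∧
  Pre_get_character_lvl_py (pvDiffWitness_get_character_lvl_py) ∧
  D_get_character_lvl_py (pvDiffWitness_get_character_lvl_py) ∧
  get_character_lvl_py (pvDiffWitness_get_character_lvl_py) = pvDiffWitnessOut_get_character_lvl_py.1 ∧
  get_character_lvl_py_alt (pvDiffWitness_get_character_lvl_py) = pvDiffWitnessOut_get_character_lvl_py.2 ∧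
  pvDiffWitnessOut_get_character_lvl_py.1 ≠ pvDiffWitnessOut_get_character_lvl_py.2

def Claim_exact_get_character_lvl_py : Prop :=
  ∀ (lines : List String), Dom_get_character_lvl_py lines → Pre_get_character_lvl_py lines →
    D_get_character_lvl_py lines → get_character_lvl_py lines ≠ get_character_lvl_py_alt lines

-- ===== LEMMAS AND PROOFS =====

theorem pvSingle_inj (c d : Char) : pvSingle c = pvSingle d ↔ c = d := by
  constructor
  · intro h
    have := congrArg String.toList h
    simpa [pvSingle, String.toList_ofList] using this
  · intro h; rw [h]

-- the two nested for-loops produce the joined characters as singleton tokens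
theorem pvTokens_inner (cs : List Char) (acc : List String) :
    cs.foldl (fun tokens c => tokens ++ [pvSingle c]) acc = acc ++ cs.map pvSingle := by
  induction cs generalizing acc with
  | nil => simp
  | cons c cs ih => simp [List.foldl, ih]

theorem pvTokens_outer (ls : List String) (acc : List String) :
    ls.foldl (fun tokens l => l.toList.foldl (fun tokens c => tokens ++ [pvSingle c]) tokens) acc
      = acc ++ (ls.flatMap String.toList).map pvSingle := by
  induction ls generalizing acc with
  | nil => simp
  | cons l ls ih =>
    simp only [List.foldl_cons]
    rw [pvTokens_inner, ih]
    simp [List.append_assoc]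

theorem pvTokens_eq (lines : List String) :
    pvTokens lines = (pvConcat lines).map pvSingle := by
  unfold pvTokens pvConcat
  simpa using pvTokens_outer lines []

-- lookahead into the unprocessed region of the token list
theorem pvLook (P : List String) (cs : List Char) (k : Nat) :
    (P ++ cs.map pvSingle)[P.length + k]? = (cs[k]?).map pvSingle := by
  rw [List.getElem?_append_right (by omega)]
  simp

theorem pvLookc (P : List String) (cs : List Char) (k : Nat) (c : Char) :
    (P ++ cs.map pvSingle)[P.length + k]? = some (pvSingle c) ↔ cs[k]? = some c := by
  rw [pvLook]
  constructor
  · intro h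
    rcases Option.map_eq_some_iff.1 h with ⟨d, hd, he⟩
    rw [hd, Option.some_inj]
    exact ((pvSingle_inj d c).1 he).symm ▸ rfl
  · intro h; rw [h]; rfl

theorem pvMergeAt_mid (P : List String) (X : List String) (tag : String) :
    pvMergeAt (P ++ X) P.length tag = P ++ [tag] ++ X.drop 3 := by
  unfold pvMergeAt
  rw [List.take_left]
  congr 1
  simp [List.drop_append]

theorem pvTwoGet (l : List Char) (x y : Char) (h0 : l[0]? = some x) (h1 : l[1]? = some y) :
    ∃ rr, l = x :: y :: rr := by
  rcases l with _ | ⟨a, _ | ⟨b, rr⟩⟩ <;> simp_all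

-- step lemmas: what one iteration of A's loop does on each head shape ---------------------------

theorem pvStep_other (P : List String) (c : Char) (rest : List Char) (hc : c ≠ '<') :
    pvStep (P ++ (c :: rest).map pvSingle) P.length = P ++ (c :: rest).map pvSingle := by
  unfold pvStep
  simp only []
  have hget0 : (P ++ (c :: rest).map pvSingle)[P.length]? = some (pvSingle c) := by
    simpa using pvLook P (c :: rest) 0
  simp only [hget0, Option.getD_some]
  have hne : pvSingle c ≠ "<" := fun h => hc ((pvSingle_inj c '<').1 h)
  rw [if_neg (by rintro ⟨h, -⟩; exact hne h)]
  rw [if_neg (by rintro ⟨h, -⟩; exact hne h)]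

theorem pvStep_lt_default (P : List String) (rest : List Char)
    (h1 : ¬(rest[0]? = some 't' ∧ rest[1]? = some '>'))
    (h2 : ¬(rest[0]? = some 'n' ∧ rest[1]? = some '>')) :
    pvStep (P ++ ('<' :: rest).map pvSingle) P.length = P ++ ('<' :: rest).map pvSingle := by
  unfold pvStep
  simp only []
  have hget0 : (P ++ ('<' :: rest).map pvSingle)[P.length]? = some (pvSingle '<') := by
    simpa using pvLook P ('<' :: rest) 0
  simp only [hget0, Option.getD_some]
  have e1 : ∀ d, (P ++ ('<' :: rest).map pvSingle)[P.length + 1]? = some (pvSingle d) ↔ rest[0]? = some d := by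
    intro d
    have := pvLookc P ('<' :: rest) 1 d
    simpa using this
  have e2 : ∀ d, (P ++ ('<' :: rest).map pvSingle)[P.length + 2]? = some (pvSingle d) ↔ rest[1]? = some d := by
    intro d
    have := pvLookc P ('<' :: rest) 2 d
    simpa using this
  have hinner : (if pvSingle '<' = "<" ∧
      (P ++ ('<' :: rest).map pvSingle)[P.length + 1]? = some "t" ∧
      (P ++ ('<' :: rest).map pvSingle)[P.length + 2]? = some ">" then
        pvMergeAt (P ++ ('<' :: rest).map pvSingle) P.length "<t>"
      else P ++ ('<' :: rest).map pvSingle) = P ++ ('<' :: rest).map pvSingle :=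
    if_neg (by rintro ⟨-, ht, hgt⟩; exact h1 ⟨(e1 't').1 ht, (e2 '>').1 hgt⟩)
  rw [hinner]
  exact if_neg (by rintro ⟨-, hn, hgt⟩; exact h2 ⟨(e1 'n').1 hn, (e2 '>').1 hgt⟩)

theorem pvStep_t (P : List String) (rest' : List Char)
    (hq : ¬(rest'[0]? = some 'n' ∧ rest'[1]? = some '>')) :
    pvStep (P ++ ('<' :: 't' :: '>' :: rest').map pvSingle) P.length
      = P ++ ["<t>"] ++ rest'.map pvSingle := by
  unfold pvStep
  simp only []
  have hget0 : (P ++ ('<' :: 't' :: '>' :: rest').map pvSingle)[P.length]? = some (pvSingle '<') := by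
    simpa using pvLook P ('<' :: 't' :: '>' :: rest') 0
  simp only [hget0, Option.getD_some]
  have hm : pvMergeAt (P ++ ('<' :: 't' :: '>' :: rest').map pvSingle) P.length "<t>"
      = (P ++ ["<t>"]) ++ rest'.map pvSingle := by
    have := pvMergeAt_mid P (('<' :: 't' :: '>' :: rest').map pvSingle) "<t>"
    simpa using this
  have hinner : (if pvSingle '<' = "<" ∧
      (P ++ ('<' :: 't' :: '>' :: rest').map pvSingle)[P.length + 1]? = some "t" ∧
      (P ++ ('<' :: 't' :: '>' :: rest').map pvSingle)[P.length + 2]? = some ">" then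
        pvMergeAt (P ++ ('<' :: 't' :: '>' :: rest').map pvSingle) P.length "<t>"
      else P ++ ('<' :: 't' :: '>' :: rest').map pvSingle)
      = (P ++ ["<t>"]) ++ rest'.map pvSingle := by
    rw [if_pos ⟨rfl, (pvLookc P ('<' :: 't' :: '>' :: rest') 1 't').2 (by simp),
        (pvLookc P ('<' :: 't' :: '>' :: rest') 2 '>').2 (by simp)⟩]
    exact hm
  rw [hinner]
  have e1 : ∀ d, ((P ++ ["<t>"]) ++ rest'.map pvSingle)[P.length + 1]? = some (pvSingle d) ↔ rest'[0]? = some d := by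
    intro d
    have := pvLookc (P ++ ["<t>"]) rest' 0 d
    simpa [show (P ++ ["<t>"]).length = P.length + 1 by simp] using this
  have e2 : ∀ d, ((P ++ ["<t>"]) ++ rest'.map pvSingle)[P.length + 2]? = some (pvSingle d) ↔ rest'[1]? = some d := by
    intro d
    have := pvLookc (P ++ ["<t>"]) rest' 1 d
    simpa [show (P ++ ["<t>"]).length + 1 = P.length + 2 by simp] using this
  rw [if_neg (by rintro ⟨-, hn, hgt⟩; exact hq ⟨(e1 'n').1 hn, (e2 '>').1 hgt⟩)]

theorem pvStep_n (P : List String) (rest' : List Char) :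
    pvStep (P ++ ('<' :: 'n' :: '>' :: rest').map pvSingle) P.length
      = P ++ ["<n>"] ++ rest'.map pvSingle := by
  unfold pvStep
  simp only []
  have hget0 : (P ++ ('<' :: 'n' :: '>' :: rest').map pvSingle)[P.length]? = some (pvSingle '<') := by
    simpa using pvLook P ('<' :: 'n' :: '>' :: rest') 0
  simp only [hget0, Option.getD_some]
  have hn1 : (P ++ ('<' :: 'n' :: '>' :: rest').map pvSingle)[P.length + 1]? = some "n" :=
    (pvLookc P ('<' :: 'n' :: '>' :: rest') 1 'n').2 (by simp)
  have hinner : (if pvSingle '<' = "<" ∧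
      (P ++ ('<' :: 'n' :: '>' :: rest').map pvSingle)[P.length + 1]? = some "t" ∧
      (P ++ ('<' :: 'n' :: '>' :: rest').map pvSingle)[P.length + 2]? = some ">" then
        pvMergeAt (P ++ ('<' :: 'n' :: '>' :: rest').map pvSingle) P.length "<t>"
      else P ++ ('<' :: 'n' :: '>' :: rest').map pvSingle)
      = P ++ ('<' :: 'n' :: '>' :: rest').map pvSingle := by
    refine if_neg ?_
    rintro ⟨-, ht, -⟩
    rw [hn1] at ht
    exact absurd ((pvSingle_inj 'n' 't').1 (Option.some_inj.1 ht)) (by decide)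
  rw [hinner]
  rw [if_pos ⟨rfl, hn1, (pvLookc P ('<' :: 'n' :: '>' :: rest') 2 '>').2 (by simp)⟩]
  have := pvMergeAt_mid P (('<' :: 'n' :: '>' :: rest').map pvSingle) "<n>"
  simpa using this

-- B's scan on a head that merges nothing
theorem pvScanB_default (c : Char) (rest : List Char)
    (h : ¬(c = '<' ∧ rest[0]? = some 't' ∧ rest[1]? = some '>'))
    (h2 : ¬(c = '<' ∧ rest[0]? = some 'n' ∧ rest[1]? = some '>')) :
    pvScanB (c :: rest) = pvSingle c :: pvScanB rest := by
  rw [pvScanB.eq_def]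
  split
  · rename_i heq; injection heq with hh1 hh2; subst hh1; subst hh2; simp at h
  · rename_i heq; injection heq with hh1 hh2; subst hh1; subst hh2; simp at h2
  · rename_i heq; injection heq with hh1 hh2; subst hh1; rw [hh2]
  · rename_i heq; exact absurd heq (by simp)

theorem pvJoin_aux (ls : List String) (a : String) :
    (List.foldl (fun r s => r ++ s) a ls).toList = a.toList ++ ls.flatMap String.toList := by
  induction ls generalizing a with
  | nil => simp
  | cons l ls ih => simp [ih]

theorem pvJoined_eq (lines : List String) : pvJoined lines = pvConcat lines := by
  unfold pvJoined pvConcat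
  rw [String.join, pvJoin_aux lines ""]
  simp

-- A's loop, written as a structural scan: it reproduces the stale-t double merge
def pvScanFull : List Char → List String
  | '<' :: 't' :: '>' :: 'n' :: '>' :: rest => "<n>" :: pvScanFull rest
  | '<' :: 't' :: '>' :: rest => "<t>" :: pvScanFull rest
  | '<' :: 'n' :: '>' :: rest => "<n>" :: pvScanFull rest
  | c :: rest => pvSingle c :: pvScanFull rest
  | [] => []

theorem pvStep_quirk (P : List String) (rest' : List Char) :
    pvStep (P ++ ('<' :: 't' :: '>' :: 'n' :: '>' :: rest').map pvSingle) P.length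
      = P ++ ["<n>"] ++ rest'.map pvSingle := by
  unfold pvStep
  simp only []
  have hget0 : (P ++ ('<' :: 't' :: '>' :: 'n' :: '>' :: rest').map pvSingle)[P.length]? = some (pvSingle '<') := by
    simpa using pvLook P ('<' :: 't' :: '>' :: 'n' :: '>' :: rest') 0
  simp only [hget0, Option.getD_some]
  have hm : pvMergeAt (P ++ ('<' :: 't' :: '>' :: 'n' :: '>' :: rest').map pvSingle) P.length "<t>"
      = (P ++ ["<t>"]) ++ ('n' :: '>' :: rest').map pvSingle := by
    have := pvMergeAt_mid P (('<' :: 't' :: '>' :: 'n' :: '>' :: rest').map pvSingle) "<t>"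
    simpa using this
  have hinner : (if pvSingle '<' = "<" ∧
      (P ++ ('<' :: 't' :: '>' :: 'n' :: '>' :: rest').map pvSingle)[P.length + 1]? = some "t" ∧
      (P ++ ('<' :: 't' :: '>' :: 'n' :: '>' :: rest').map pvSingle)[P.length + 2]? = some ">" then
        pvMergeAt (P ++ ('<' :: 't' :: '>' :: 'n' :: '>' :: rest').map pvSingle) P.length "<t>"
      else P ++ ('<' :: 't' :: '>' :: 'n' :: '>' :: rest').map pvSingle)
      = (P ++ ["<t>"]) ++ ('n' :: '>' :: rest').map pvSingle := by
    rw [if_pos ⟨rfl, (pvLookc P ('<' :: 't' :: '>' :: 'n' :: '>' :: rest') 1 't').2 (by simp),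
        (pvLookc P ('<' :: 't' :: '>' :: 'n' :: '>' :: rest') 2 '>').2 (by simp)⟩]
    exact hm
  rw [hinner]
  have hx1 : ((P ++ ["<t>"]) ++ ('n' :: '>' :: rest').map pvSingle)[P.length + 1]? = some "n" := by
    rw [show P.length + 1 = (P ++ ["<t>"]).length + 0 by simp]
    exact (pvLookc (P ++ ["<t>"]) ('n' :: '>' :: rest') 0 'n').2 (by simp)
  have hx2 : ((P ++ ["<t>"]) ++ ('n' :: '>' :: rest').map pvSingle)[P.length + 2]? = some ">" := by
    rw [show P.length + 2 = (P ++ ["<t>"]).length + 1 by simp]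
    exact (pvLookc (P ++ ["<t>"]) ('n' :: '>' :: rest') 1 '>').2 (by simp)
  rw [if_pos ⟨rfl, hx1, hx2⟩]
  rw [show pvMergeAt ((P ++ ["<t>"]) ++ ('n' :: '>' :: rest').map pvSingle) P.length "<n>"
        = pvMergeAt (P ++ (["<t>"] ++ ('n' :: '>' :: rest').map pvSingle)) P.length "<n>" by simp,
      pvMergeAt_mid P (["<t>"] ++ ('n' :: '>' :: rest').map pvSingle) "<n>"]
  simp

-- reductions of the two scans on a head that merges nothing
theorem pvScanFull_t (rest' : List Char)
    (hq : ¬(rest'[0]? = some 'n' ∧ rest'[1]? = some '>')) :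
    pvScanFull ('<' :: 't' :: '>' :: rest') = "<t>" :: pvScanFull rest' := by
  rw [pvScanFull.eq_def]
  split
  · rename_i heq
    injection heq with h1 h2; injection h2 with h1 h2; injection h2 with h1 h2
    subst h2; simp at hq
  · rename_i heq
    injection heq with h1 h2; injection h2 with h1 h2; injection h2 with h1 h2
    rw [h2]
  · rename_i heq
    injection heq with h1 h2; injection h2 with h1 h2
    exact absurd h1 (by decide)
  · rename_i hq1 hq2 hq3 heq
    injection heq with h1 h2
    exact (hq2 rest' h1.symm h2.symm).elim
  · rename_i heq; exact absurd heq (by simp)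

theorem pvScanFull_n (rest' : List Char) :
    pvScanFull ('<' :: 'n' :: '>' :: rest') = "<n>" :: pvScanFull rest' := rfl

theorem pvScanFull_default (c : Char) (rest : List Char)
    (h : ¬(c = '<' ∧ rest[0]? = some 't' ∧ rest[1]? = some '>'))
    (h2 : ¬(c = '<' ∧ rest[0]? = some 'n' ∧ rest[1]? = some '>')) :
    pvScanFull (c :: rest) = pvSingle c :: pvScanFull rest := by
  rw [pvScanFull.eq_def]
  split
  · rename_i heq; injection heq with hh1 hh2; subst hh1; subst hh2; simp at h
  · rename_i heq; injection heq with hh1 hh2; subst hh1; subst hh2; simp at h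
  · rename_i heq; injection heq with hh1 hh2; subst hh1; subst hh2; simp at h2
  · rename_i heq; injection heq with hh1 hh2; subst hh1; rw [hh2]
  · rename_i heq; exact absurd heq (by simp)

-- core invariant: A's enumerate/pop loop is the structural scan pvScanFull
theorem pvLoop_full : ∀ (fuel : Nat) (cs : List Char) (P : List String),
    cs.length ≤ fuel →
    pvLoopA fuel (P ++ cs.map pvSingle) P.length = P ++ pvScanFull cs := by
  intro fuel
  induction fuel with
  | zero =>
    intro cs P hlen
    have : cs = [] := List.eq_nil_of_length_eq_zero (by omega)
    subst this
    simp [pvLoopA, pvScanFull]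
  | succ fuel ih =>
    intro cs P hlen
    rcases cs with _ | ⟨c, rest⟩
    · simp [pvLoopA, pvScanFull]
    have hguard : P.length < (P ++ (c :: rest).map pvSingle).length := by simp
    rw [show pvLoopA (fuel + 1) (P ++ (c :: rest).map pvSingle) P.length
          = pvLoopA fuel (pvStep (P ++ (c :: rest).map pvSingle) P.length) (P.length + 1) by
        simp [pvLoopA, hguard]]
    by_cases hc : c = '<'
    · subst hc
      by_cases h1 : rest[0]? = some 't' ∧ rest[1]? = some '>'
      · obtain ⟨rest', hrest⟩ := pvTwoGet rest 't' '>' h1.1 h1.2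
        subst hrest
        by_cases hq : rest'[0]? = some 'n' ∧ rest'[1]? = some '>'
        · obtain ⟨rr, hrr⟩ := pvTwoGet rest' 'n' '>' hq.1 hq.2
          subst hrr
          rw [pvStep_quirk P rr]
          have := ih rr (P ++ ["<n>"]) (by simp at hlen ⊢; omega)
          rw [show P.length + 1 = (P ++ ["<n>"]).length by simp, this]
          simp [pvScanFull]
        · rw [pvStep_t P rest' hq]
          have := ih rest' (P ++ ["<t>"]) (by simp at hlen ⊢; omega)
          rw [show P.length + 1 = (P ++ ["<t>"]).length by simp, this]
          rw [pvScanFull_t rest' hq]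
          simp
      · by_cases h2 : rest[0]? = some 'n' ∧ rest[1]? = some '>'
        · obtain ⟨rest', hrest⟩ := pvTwoGet rest 'n' '>' h2.1 h2.2
          subst hrest
          rw [pvStep_n P rest']
          have := ih rest' (P ++ ["<n>"]) (by simp at hlen ⊢; omega)
          rw [show P.length + 1 = (P ++ ["<n>"]).length by simp, this]
          rw [pvScanFull_n rest']
          simp
        · rw [pvStep_lt_default P rest h1 h2]
          have := ih rest (P ++ [pvSingle '<']) (by simp at hlen ⊢; omega)
          rw [show P ++ ('<' :: rest).map pvSingle = (P ++ [pvSingle '<']) ++ rest.map pvSingle by simp,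
              show P.length + 1 = (P ++ [pvSingle '<']).length by simp, this]
          rw [pvScanFull_default '<' rest (by rintro ⟨-, ha, hb⟩; exact h1 ⟨ha, hb⟩)
                (by rintro ⟨-, ha, hb⟩; exact h2 ⟨ha, hb⟩)]
          simp
    · rw [pvStep_other P c rest hc]
      have := ih rest (P ++ [pvSingle c]) (by simp at hlen ⊢; omega)
      rw [show P ++ (c :: rest).map pvSingle = (P ++ [pvSingle c]) ++ rest.map pvSingle by simp,
          show P.length + 1 = (P ++ [pvSingle c]).length by simp, this]
      rw [pvScanFull_default c rest (by rintro ⟨h, -⟩; exact hc h) (by rintro ⟨h, -⟩; exact hc h)]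
      simp

-- without an occurrence of "<t>n>" the two scans agree
theorem pvScanFull_eq_scanB : ∀ (cs : List Char),
    ¬ (['<','t','>','n','>'] <:+: cs) → pvScanFull cs = pvScanB cs := by
  intro cs
  induction cs using pvScanFull.induct with
  | case1 rest ih =>
    intro hq
    exact absurd ⟨[], rest, by simp⟩ hq
  | case2 rest h1 ih =>
    intro hq
    have hqn : ¬(rest[0]? = some 'n' ∧ rest[1]? = some '>') := by
      rintro ⟨ha, hb⟩
      obtain ⟨rr, hrr⟩ := pvTwoGet rest 'n' '>' ha hb
      exact h1 rr hrr
    rw [show pvScanB ('<' :: 't' :: '>' :: rest) = "<t>" :: pvScanB rest from rfl,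
        pvScanFull_t rest hqn,
        ih (fun h => hq (List.infix_cons (List.infix_cons (List.infix_cons h))))]
  | case3 rest ih =>
    intro hq
    rw [show pvScanB ('<' :: 'n' :: '>' :: rest) = "<n>" :: pvScanB rest from rfl,
        pvScanFull_n rest,
        ih (fun h => hq (List.infix_cons (List.infix_cons (List.infix_cons h))))]
  | case4 c rest h1 h2 h3 ih =>
    intro hq
    have hnt : ¬(c = '<' ∧ rest[0]? = some 't' ∧ rest[1]? = some '>') := by
      rintro ⟨hce, ha, hb⟩
      obtain ⟨rr, hrr⟩ := pvTwoGet rest 't' '>' ha hb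
      exact h2 rr hce hrr
    have hnn : ¬(c = '<' ∧ rest[0]? = some 'n' ∧ rest[1]? = some '>') := by
      rintro ⟨hce, ha, hb⟩
      obtain ⟨rr, hrr⟩ := pvTwoGet rest 'n' '>' ha hb
      exact h3 rr hce hrr
    rw [pvScanFull_default c rest hnt hnn, pvScanB_default c rest hnt hnn,
        ih (fun h => hq (List.infix_cons h))]
  | case5 =>
    intro _
    rfl

-- A's scan never produces more tokens than B's …
theorem pvScanFull_len_le : ∀ (cs : List Char),
    (pvScanFull cs).length ≤ (pvScanB cs).length := by
  intro cs
  induction cs using pvScanFull.induct with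
  | case1 rest ih =>
    have : pvScanB ('<' :: 't' :: '>' :: 'n' :: '>' :: rest)
        = "<t>" :: pvSingle 'n' :: pvSingle '>' :: pvScanB rest := by
      rw [show pvScanB ('<' :: 't' :: '>' :: 'n' :: '>' :: rest)
            = "<t>" :: pvScanB ('n' :: '>' :: rest) from rfl,
          pvScanB_default 'n' ('>' :: rest) (by simp) (by simp),
          pvScanB_default '>' rest (by simp) (by simp)]
    rw [this, show pvScanFull ('<' :: 't' :: '>' :: 'n' :: '>' :: rest) = "<n>" :: pvScanFull rest from rfl]
    simp only [List.length_cons]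
    omega
  | case2 rest h1 ih =>
    have hq : ¬(rest[0]? = some 'n' ∧ rest[1]? = some '>') := by
      rintro ⟨ha, hb⟩
      obtain ⟨rr, hrr⟩ := pvTwoGet rest 'n' '>' ha hb
      exact h1 rr hrr
    rw [pvScanFull_t rest hq, show pvScanB ('<' :: 't' :: '>' :: rest) = "<t>" :: pvScanB rest from rfl]
    simpa using ih
  | case3 rest ih =>
    rw [pvScanFull_n rest, show pvScanB ('<' :: 'n' :: '>' :: rest) = "<n>" :: pvScanB rest from rfl]
    simpa using ih
  | case4 c rest h1 h2 h3 ih =>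
    have hnt : ¬(c = '<' ∧ rest[0]? = some 't' ∧ rest[1]? = some '>') := by
      rintro ⟨hce, ha, hb⟩
      obtain ⟨rr, hrr⟩ := pvTwoGet rest 't' '>' ha hb
      exact h2 rr hce hrr
    have hnn : ¬(c = '<' ∧ rest[0]? = some 'n' ∧ rest[1]? = some '>') := by
      rintro ⟨hce, ha, hb⟩
      obtain ⟨rr, hrr⟩ := pvTwoGet rest 'n' '>' ha hb
      exact h3 rr hce hrr
    rw [pvScanFull_default c rest hnt hnn, pvScanB_default c rest hnt hnn]
    simpa using ih
  | case5 => simp [pvScanFull, pvScanB]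

-- … and strictly fewer as soon as "<t>n>" occurs
theorem pvScanFull_len_lt : ∀ (cs : List Char),
    (['<','t','>','n','>'] <:+: cs) → (pvScanFull cs).length < (pvScanB cs).length := by
  intro cs
  induction cs using pvScanFull.induct with
  | case1 rest ih =>
    intro _
    have : pvScanB ('<' :: 't' :: '>' :: 'n' :: '>' :: rest)
        = "<t>" :: pvSingle 'n' :: pvSingle '>' :: pvScanB rest := by
      rw [show pvScanB ('<' :: 't' :: '>' :: 'n' :: '>' :: rest)
            = "<t>" :: pvScanB ('n' :: '>' :: rest) from rfl,
          pvScanB_default 'n' ('>' :: rest) (by simp) (by simp),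
          pvScanB_default '>' rest (by simp) (by simp)]
    rw [this, show pvScanFull ('<' :: 't' :: '>' :: 'n' :: '>' :: rest) = "<n>" :: pvScanFull rest from rfl]
    have := pvScanFull_len_le rest
    simp only [List.length_cons]
    omega
  | case2 rest h1 ih =>
    intro hin
    have hq : ¬(rest[0]? = some 'n' ∧ rest[1]? = some '>') := by
      rintro ⟨ha, hb⟩
      obtain ⟨rr, hrr⟩ := pvTwoGet rest 'n' '>' ha hb
      exact h1 rr hrr
    have hin' : ['<','t','>','n','>'] <:+: rest := by
      rcases List.infix_cons_iff.1 hin with hp | h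
      · rcases List.cons_prefix_cons.1 hp with ⟨-, hp⟩
        rcases List.cons_prefix_cons.1 hp with ⟨-, hp⟩
        rcases List.cons_prefix_cons.1 hp with ⟨-, hp⟩
        rcases hp with ⟨t, ht⟩
        exact absurd ⟨by simp [← ht], by simp [← ht]⟩ hq
      rcases List.infix_cons_iff.1 h with hp | h
      · exact absurd (List.cons_prefix_cons.1 hp).1 (by decide)
      rcases List.infix_cons_iff.1 h with hp | h
      · exact absurd (List.cons_prefix_cons.1 hp).1 (by decide)
      exact h
    rw [pvScanFull_t rest hq, show pvScanB ('<' :: 't' :: '>' :: rest) = "<t>" :: pvScanB rest from rfl]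
    simpa using ih hin'
  | case3 rest ih =>
    intro hin
    have hin' : ['<','t','>','n','>'] <:+: rest := by
      rcases List.infix_cons_iff.1 hin with hp | h
      · rcases List.cons_prefix_cons.1 hp with ⟨-, hp⟩
        exact absurd (List.cons_prefix_cons.1 hp).1 (by decide)
      rcases List.infix_cons_iff.1 h with hp | h
      · exact absurd (List.cons_prefix_cons.1 hp).1 (by decide)
      rcases List.infix_cons_iff.1 h with hp | h
      · exact absurd (List.cons_prefix_cons.1 hp).1 (by decide)
      exact h
    rw [pvScanFull_n rest, show pvScanB ('<' :: 'n' :: '>' :: rest) = "<n>" :: pvScanB rest from rfl]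
    simpa using ih hin'
  | case4 c rest h1 h2 h3 ih =>
    intro hin
    have hnt : ¬(c = '<' ∧ rest[0]? = some 't' ∧ rest[1]? = some '>') := by
      rintro ⟨hce, ha, hb⟩
      obtain ⟨rr, hrr⟩ := pvTwoGet rest 't' '>' ha hb
      exact h2 rr hce hrr
    have hin' : ['<','t','>','n','>'] <:+: rest := by
      rcases List.infix_cons_iff.1 hin with hp | h
      · rcases List.cons_prefix_cons.1 hp with ⟨hce, hp⟩
        rcases hp with ⟨t, ht⟩
        exact (h1 t hce.symm (by simp [← ht])).elim
      · exact h
    rw [pvScanFull_default c rest hnt (by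
          rintro ⟨hce, ha, hb⟩
          obtain ⟨rr, hrr⟩ := pvTwoGet rest 'n' '>' ha hb
          exact h3 rr hce hrr),
        pvScanB_default c rest hnt (by
          rintro ⟨hce, ha, hb⟩
          obtain ⟨rr, hrr⟩ := pvTwoGet rest 'n' '>' ha hb
          exact h3 rr hce hrr)]
    simpa using ih hin'
  | case5 =>
    intro hin
    simp at hin

-- ===== VERDICT =====
theorem get_character_lvl_py_spec : Claim_unchanged_get_character_lvl_py := by
  intro lines _ _ hnd
  unfold get_character_lvl_py get_character_lvl_py_alt
  rw [pvTokens_eq]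
  have := pvLoop_full ((pvConcat lines).map pvSingle).length (pvConcat lines) [] (by simp)
  have hnq : ¬ (['<','t','>','n','>'] <:+: pvConcat lines) := fun h =>
    hnd (by unfold D_get_character_lvl_py; rw [pvJoined_eq]; exact h)
  simpa [pvScanFull_eq_scanB (pvConcat lines) hnq] using this

theorem get_character_lvl_py_changed : Claim_changed_get_character_lvl_py := by
  unfold Claim_changed_get_character_lvl_py; decide

theorem get_character_lvl_py_tight : Claim_exact_get_character_lvl_py := by
  intro lines _ _ hd heq
  have hin : ['<','t','>','n','>'] <:+: pvConcat lines := by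
    have := hd
    unfold D_get_character_lvl_py at this
    rwa [pvJoined_eq] at this
  have hA : get_character_lvl_py lines = pvScanFull (pvConcat lines) := by
    unfold get_character_lvl_py
    rw [pvTokens_eq]
    simpa using pvLoop_full ((pvConcat lines).map pvSingle).length (pvConcat lines) [] (by simp)
  have hlt := pvScanFull_len_lt (pvConcat lines) hin
  rw [hA] at heq
  unfold get_character_lvl_py_alt at heq
  rw [heq] at hlt
  omega
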